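-- pv_equiv track=rewrite | github.com/biochem-data-sci/GenPept-Curated-2025 | 06_data_visualization.py | alphabet_checks
-- ===== SOURCE A (Python) =====
-- AA20 = set("ACDEFGHIKLMNPQRSTVWY")
--
-- def alphabet_checks(seq: str) -> dict[str, bool]:
--     non_std = set("UOBJZX")
--     illegal = set("*- .\t\r\n")
--     seq_u = seq.upper()
--     return {
--         "has_nonstd": any(c in non_std for c in seq_u),
--         "has_illegal": any(c in illegal for c in seq_u),
--         "has_outside20": any((c not in AA20) and (c not in non_std) and (c not in illegal) for c in seq_u),
--     }
-- ===== SOURCE B (Python) =====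
-- AA20 = set("ACDEFGHIKLMNPQRSTVWY")
--
-- def alphabet_checks(seq: str) -> dict[str, bool]:
--     # Classification table: map every known character to the flag it sets
--     # ("" for the 20 standard amino acids, i.e. no flag); unknown chars fall
--     # through to "has_outside20".  One pass over the sequence collects the
--     # set of flags seen; the result is read off by membership.
--     cat = {}
--     for c in "ACDEFGHIKLMNPQRSTVWY":
--         cat[c] = ""
--     for c in "UOBJZX":
--         cat[c] = "has_nonstd"
--     for c in "*- .\t\r\n":
--         cat[c] = "has_illegal"
--     seen = set()
--     for c in seq.upper():
--         k = cat.get(c, "has_outside20")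
--         if k:
--             seen.add(k)
--     return {
--         "has_nonstd": "has_nonstd" in seen,
--         "has_illegal": "has_illegal" in seen,
--         "has_outside20": "has_outside20" in seen,
--     }
-- ===== Notes on version B (the rewrite author's own statement) =====
-- stated objective: faster
-- what changed: B replaces A's three any() scans against three constant sets by a single classification dict (char -> flag name) built once, one pass over the sequence accumulating the set of flags seen, and three membership reads.
import Mathlib
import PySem

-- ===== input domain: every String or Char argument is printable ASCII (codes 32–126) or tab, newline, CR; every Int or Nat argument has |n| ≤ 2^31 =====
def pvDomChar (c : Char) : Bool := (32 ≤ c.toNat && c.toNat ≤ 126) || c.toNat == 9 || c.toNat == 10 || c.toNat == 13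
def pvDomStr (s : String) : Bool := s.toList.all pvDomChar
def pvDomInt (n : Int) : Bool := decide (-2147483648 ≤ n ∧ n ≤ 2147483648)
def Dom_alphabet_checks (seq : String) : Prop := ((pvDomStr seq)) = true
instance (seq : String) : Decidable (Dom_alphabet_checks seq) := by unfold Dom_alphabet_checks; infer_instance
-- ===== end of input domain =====

-- B classifies each character through a dict (char -> flag name) built once and makes ONE pass
-- collecting the set of flags seen, instead of A's three any() scans; same asymptotic cost.


-- ===== PORT A =====
def alphabet_checks (seq : String) : List (String × Bool) :=
  let non_std : PySem.Set Char := PySem.Set.ofList "UOBJZX".toList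
  let illegal : PySem.Set Char := PySem.Set.ofList "*- .\t\r\n".toList
  let seq_u : List Char := PySem.Chars.upper seq.toList
  [("has_nonstd", seq_u.any (fun c => PySem.Set.contains non_std c)),
   ("has_illegal", seq_u.any (fun c => PySem.Set.contains illegal c)),
   ("has_outside20", seq_u.any (fun c =>
      !PySem.Set.contains (PySem.Set.ofList "ACDEFGHIKLMNPQRSTVWY".toList) c
      && !PySem.Set.contains non_std c && !PySem.Set.contains illegal c))]

-- ===== PORT B =====
-- the classification dict: three insert loops over the literal alphabets
def pvCat : PySem.Dict Char String :=
  let d := "ACDEFGHIKLMNPQRSTVWY".toList.foldl (fun d c => d.insert c "") PySem.Dict.empty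
  let d := "UOBJZX".toList.foldl (fun d c => d.insert c "has_nonstd") d
  "*- .\t\r\n".toList.foldl (fun d c => d.insert c "has_illegal") d

def alphabet_checks_alt (seq : String) : List (String × Bool) :=
  let seen : PySem.Set String :=
    (PySem.Chars.upper seq.toList).foldl
      (fun s c =>
        let k := pvCat.getD c "has_outside20"
        if k = "" then s else PySem.Set.add s k)   -- Python 'if k:' — nonempty-string truthiness
      PySem.Set.empty
  [("has_nonstd", PySem.Set.contains seen "has_nonstd"),
   ("has_illegal", PySem.Set.contains seen "has_illegal"),
   ("has_outside20", PySem.Set.contains seen "has_outside20")]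

-- ===== PRECONDITION & SPEC =====
def Spec_alphabet_checks (seq : String) (out : List (String × Bool)) : Prop := out = alphabet_checks_alt seq
instance (seq : String) (out : List (String × Bool)) : Decidable (Spec_alphabet_checks seq out) := by unfold Spec_alphabet_checks; infer_instance

-- ===== CLAIM (what is proved, stated in full; the proofs are below) =====
def Claim_equal_alphabet_checks : Prop := ∀ (seq : String), Dom_alphabet_checks seq → Spec_alphabet_checks seq (alphabet_checks seq)

-- ===== LEMMAS AND PROOFS =====

-- the classification dict, written out
theorem pvCat_eq : pvCat = PySem.Dict.mk [('A', ""), ('C', ""), ('D', ""), ('E', ""), ('F', ""),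
    ('G', ""), ('H', ""), ('I', ""), ('K', ""), ('L', ""),
    ('M', ""), ('N', ""), ('P', ""), ('Q', ""), ('R', ""), ('S', ""), ('T', ""), ('V', ""), ('W', ""), ('Y', ""),
    ('U', "has_nonstd"), ('O', "has_nonstd"), ('B', "has_nonstd"), ('J', "has_nonstd"), ('Z', "has_nonstd"),
    ('X', "has_nonstd"), ('*', "has_illegal"), ('-', "has_illegal"), (' ', "has_illegal"), ('.', "has_illegal"),
    ('\t', "has_illegal"), ('\x0d', "has_illegal"), ('\n', "has_illegal")] := by decide

-- looking up a non-default value in an assoc list with distinct keys = scanning its pairs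
theorem getD_mk_eq_of_ne (ps : List (Char × String)) (c : Char) (key dflt : String)
    (hnd : (ps.map Prod.fst).Nodup) (hk : (dflt == key) = false) :
    ((PySem.Dict.mk ps).getD c dflt == key) = ps.any (fun p => (p.2 == key) && (p.1 == c)) := by
  induction ps with
  | nil => simp [PySem.Dict.getD, PySem.Dict.get?, hk]
  | cons hd t ih =>
    obtain ⟨k, v⟩ := hd
    simp only [List.map_cons, List.nodup_cons] at hnd
    simp only [PySem.Dict.getD, PySem.Dict.get?_mk_cons, List.any_cons]
    by_cases h : (k == c) = true
    · have hc : c = k := (eq_of_beq h).symm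
      rw [if_pos h]
      have ht : t.any (fun p => (p.2 == key) && (p.1 == c)) = false := by
        rw [List.any_eq_false]
        intro p hp
        have : p.1 ≠ c := by
          subst hc; intro hpc; exact hnd.1 (hpc ▸ List.mem_map_of_mem hp)
        simp [this]
      rw [ht, h, Bool.or_false, Option.getD_some, Bool.and_true]
    · rw [if_neg h, eq_false_of_ne_true h]
      simp only [Bool.and_false, Bool.false_or]
      exact ih hnd.2
  -- looking up the default value: it comes back iff no key matches (no stored value equals it)
theorem getD_mk_eq_default (ps : List (Char × String)) (c : Char) (dflt : String)
    (hv : ∀ p ∈ ps, (p.2 == dflt) = false) :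
    ((PySem.Dict.mk ps).getD c dflt == dflt) = !(ps.any (fun p => p.1 == c)) := by
  induction ps with
  | nil => simp [PySem.Dict.getD, PySem.Dict.get?]
  | cons hd t ih =>
    obtain ⟨k, v⟩ := hd
    simp only [PySem.Dict.getD, PySem.Dict.get?_mk_cons, List.any_cons]
    by_cases h : (k == c) = true
    · rw [if_pos h, h]
      simp [hv (k, v) (List.mem_cons_self)]
    · rw [if_neg h, eq_false_of_ne_true h, Bool.false_or]
      exact ih (fun p hp => hv p (List.mem_cons_of_mem _ hp))

-- pointwise classification facts
theorem cat_nonstd (c : Char) :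
    (pvCat.getD c "has_outside20" == "has_nonstd")
      = PySem.Set.contains (PySem.Set.ofList "UOBJZX".toList) c := by
  rw [pvCat_eq, getD_mk_eq_of_ne _ _ _ _ (by decide) (by decide), ← List.any_filter]
  rw [show PySem.Set.ofList "UOBJZX".toList = "UOBJZX".toList from by decide]
  rw [show List.filter (fun p => p.2 == "has_nonstd") (PySem.Dict.mk _).items
        = [('U', "has_nonstd"), ('O', "has_nonstd"), ('B', "has_nonstd"), ('J', "has_nonstd"),
           ('Z', "has_nonstd"), ('X', "has_nonstd")] from by decide]
  simp only [PySem.Set.contains]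
  rw [Bool.eq_iff_iff]
  simp [@eq_comm Char c]

theorem cat_illegal (c : Char) :
    (pvCat.getD c "has_outside20" == "has_illegal")
      = PySem.Set.contains (PySem.Set.ofList "*- .\t\r\n".toList) c := by
  rw [pvCat_eq, getD_mk_eq_of_ne _ _ _ _ (by decide) (by decide), ← List.any_filter]
  rw [show PySem.Set.ofList "*- .\t\r\n".toList = "*- .\t\r\n".toList from by decide]
  rw [show List.filter (fun p => p.2 == "has_illegal") (PySem.Dict.mk _).items
        = [('*', "has_illegal"), ('-', "has_illegal"), (' ', "has_illegal"), ('.', "has_illegal"),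
           ('\t', "has_illegal"), ('\x0d', "has_illegal"), ('\n', "has_illegal")] from by decide]
  simp only [PySem.Set.contains]
  rw [Bool.eq_iff_iff]
  simp [@eq_comm Char c]

theorem cat_outside (c : Char) :
    (pvCat.getD c "has_outside20" == "has_outside20")
      = (!PySem.Set.contains (PySem.Set.ofList "ACDEFGHIKLMNPQRSTVWY".toList) c
         && !PySem.Set.contains (PySem.Set.ofList "UOBJZX".toList) c
         && !PySem.Set.contains (PySem.Set.ofList "*- .\t\r\n".toList) c) := by
  rw [pvCat_eq, getD_mk_eq_default _ _ _ (by decide)]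
  rw [show PySem.Set.ofList "ACDEFGHIKLMNPQRSTVWY".toList = "ACDEFGHIKLMNPQRSTVWY".toList from by decide]
  rw [show PySem.Set.ofList "UOBJZX".toList = "UOBJZX".toList from by decide]
  rw [show PySem.Set.ofList "*- .\t\r\n".toList = "*- .\t\r\n".toList from by decide]
  simp only [PySem.Set.contains]
  rw [Bool.eq_iff_iff]
  simp only [List.any_cons, List.any_nil, Bool.not_eq_true', Bool.or_eq_false_iff,
    Bool.and_eq_true, beq_eq_false_iff_ne, ne_eq]
  simp [@eq_comm Char c]
  tauto

-- a flag is in the accumulated set iff it was already there or some character classifies to it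
theorem contains_foldl_seen (l : List Char) (s : PySem.Set String) (key : String) (hk : key ≠ "") :
    PySem.Set.contains
      (l.foldl (fun s c => let k := pvCat.getD c "has_outside20"
                           if k = "" then s else PySem.Set.add s k) s) key
      = (PySem.Set.contains s key || l.any (fun c => pvCat.getD c "has_outside20" == key)) := by
  induction l generalizing s with
  | nil => simp
  | cons c t ih =>
    simp only [List.foldl_cons, List.any_cons, ih]
    by_cases h : pvCat.getD c "has_outside20" = ""
    · rw [if_pos h]
      have : (pvCat.getD c "has_outside20" == key) = false := by
        rw [h]; exact beq_false_of_ne (fun he => hk he.symm)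
      rw [this, Bool.false_or]
    · rw [if_neg h]
      have : PySem.Set.contains (PySem.Set.add s (pvCat.getD c "has_outside20")) key
          = (PySem.Set.contains s key || (pvCat.getD c "has_outside20" == key)) := by
        simp only [PySem.Set.contains, List.contains_eq_mem, PySem.Set.mem_add]
        rw [Bool.eq_iff_iff]
        simp [@eq_comm String key]
      rw [this, Bool.or_assoc]

-- ===== VERDICT (by name: the statement is the Claim_ definition above) =====
theorem alphabet_checks_spec : Claim_equal_alphabet_checks := by
  intro seq _
  show _ = _
  simp only [alphabet_checks, alphabet_checks_alt]
  rw [contains_foldl_seen _ _ "has_nonstd" (by decide),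
      contains_foldl_seen _ _ "has_illegal" (by decide),
      contains_foldl_seen _ _ "has_outside20" (by decide)]
  rw [show ∀ k, PySem.Set.contains PySem.Set.empty k = false from fun _ => rfl,
      show ∀ k, PySem.Set.contains PySem.Set.empty k = false from fun _ => rfl,
      show ∀ k, PySem.Set.contains PySem.Set.empty k = false from fun _ => rfl]
  simp only [Bool.false_or, List.cons.injEq, Prod.mk.injEq, true_and, and_true]
  refine ⟨?_, ?_, ?_⟩
  · exact List.any_congr rfl (fun c => (cat_nonstd c).symm)
  · exact List.any_congr rfl (fun c => (cat_illegal c).symm)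
  · exact List.any_congr rfl (fun c => (cat_outside c).symm)
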